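-- pv_equiv track=rewrite | github.com/cd80/autoprolab | agents/recon_agent.py | _parse_gobuster_output
-- ===== SOURCE A (Python) =====
-- from typing import Dict, List, Optional, Any
--
-- def _parse_gobuster_output(output: str) -> List[str]:
--     """Parse gobuster directory enumeration output."""
--     directories = []
--     lines = output.split('\n')
--
--     for line in lines:
--         if line.startswith('/'):
--             path = line.split()[0]
--             directories.append(path)
--
--     return directories
-- ===== SOURCE B (Python) =====
-- def _parse_gobuster_output(output: str):
--     """Single forward scan over the string: at each line start, if the line
--     begins with '/', take the maximal run of non-whitespace characters; then
--     jump directly past the next newline. No intermediate list of lines."""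
--     res = []
--     i, n = 0, len(output)
--     while i <= n:
--         if i < n and output[i] == '/':
--             j = i
--             while j < n and not output[j].isspace():
--                 j += 1
--             res.append(output[i:j])
--             i = j
--         nl = output.find('\n', i)
--         if nl == -1:
--             break
--         i = nl + 1
--     return res
-- ===== Notes on version B (the rewrite author's own statement) =====
-- stated objective: alternative
-- what changed: Replaces split('\n') plus per-line startswith/split()[0] with a single index-based forward scan that grabs the non-whitespace token at each '/' line start and jumps directly past the next newline, building no intermediate list of lines or word lists.
import Mathlib
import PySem

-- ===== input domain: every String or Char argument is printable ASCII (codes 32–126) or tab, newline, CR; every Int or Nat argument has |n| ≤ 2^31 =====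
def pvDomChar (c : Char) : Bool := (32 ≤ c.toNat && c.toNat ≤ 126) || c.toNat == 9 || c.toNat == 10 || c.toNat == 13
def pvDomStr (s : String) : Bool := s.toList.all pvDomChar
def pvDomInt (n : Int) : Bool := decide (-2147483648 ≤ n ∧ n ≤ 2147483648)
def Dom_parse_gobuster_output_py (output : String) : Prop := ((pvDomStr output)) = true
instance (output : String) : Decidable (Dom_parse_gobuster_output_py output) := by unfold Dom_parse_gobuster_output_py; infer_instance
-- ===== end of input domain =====

-- B replaces A's split('\n') + per-line filtering by one forward scan of the characters
-- (take the non-whitespace token at each '/' line start, then jump past the next newline): simpler, no intermediate list of lines.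

-- ===== PORT A =====
-- A: split output on '\n', keep lines starting with '/', append line.split()[0].
-- line.split()[0] never raises here (the kept line starts with the non-whitespace '/'), so index 0 is ported as headD.
def parse_gobuster_output_py (output : String) : List String :=
  ((PySem.Chars.splitOn output.toList ['\n']).foldl
    (fun acc line =>
      if PySem.Chars.startswith line ['/'] then
        acc ++ [(PySem.Chars.split₀ line).headD []]
      else acc) []).map String.ofList

-- ===== PORT B =====
-- Hand port of B's scanner loop over the characters: cs is always at a line start; the inner
-- `while not output[j].isspace()` token grab is takeWhile, the `output.find('\n', i)`-and-jump is
-- dropWhile-to-'\n' plus taking the tail. Exact: per-character str.isspace is exactly PySem.Chars.isspace.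
def pvScan (cs : List Char) : List (List Char) :=
  (if PySem.Chars.startswith cs ['/'] then [cs.takeWhile (fun c => !PySem.Chars.isspace c)] else []) ++
  (match h : cs.dropWhile (fun c => c ≠ '\n') with
   | [] => []
   | _ :: rest => pvScan rest)
termination_by cs.length
decreasing_by
  have h1 : (cs.dropWhile (fun c => c ≠ '\n')).length ≤ cs.length := List.length_dropWhile_le _ _
  rw [h] at h1; simp at h1; omega

def parse_gobuster_output_py_alt (output : String) : List String :=
  (pvScan output.toList).map String.ofList

-- ===== PRECONDITION & SPEC =====
def Spec_parse_gobuster_output_py (output : String) (out : List String) : Prop := out = parse_gobuster_output_py_alt output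
instance (output : String) (out : List String) : Decidable (Spec_parse_gobuster_output_py output out) := by unfold Spec_parse_gobuster_output_py; infer_instance

-- ===== CLAIM (what is proved, stated in full; the proofs are below) =====
def Claim_equal_parse_gobuster_output_py : Prop := ∀ (output : String), Dom_parse_gobuster_output_py output → Spec_parse_gobuster_output_py output (parse_gobuster_output_py output)

-- ===== LEMMAS AND PROOFS =====

def pvSplitNl (cs : List Char) : List (List Char) :=
  cs.takeWhile (fun c => c ≠ '\n') ::
  (match h : cs.dropWhile (fun c => c ≠ '\n') with
   | [] => []
   | _ :: rest => pvSplitNl rest)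
termination_by cs.length
decreasing_by
  have h1 : (cs.dropWhile (fun c => c ≠ '\n')).length ≤ cs.length := List.length_dropWhile_le _ _
  rw [h] at h1; simp at h1; omega

theorem pvSplitNl_eq (cs : List Char) : pvSplitNl cs =
    cs.takeWhile (fun c => c ≠ '\n') ::
    (match cs.dropWhile (fun c => c ≠ '\n') with
     | [] => []
     | _ :: rest => pvSplitNl rest) := by
  rw [pvSplitNl]
  rcases hd : List.dropWhile (fun c => decide (c ≠ '\n')) cs with _ | ⟨a, rest⟩ <;> simp

theorem pv_splitOn_go_nl : ∀ (fuel : Nat) (l cur : List Char) (acc : List (List Char)),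
    l.length ≤ fuel →
    PySem.Chars.splitOn.go ['\n'] fuel l cur acc =
      acc.reverse ++ ((cur.reverse ++ l.takeWhile (fun c => c ≠ '\n')) ::
        (match l.dropWhile (fun c => c ≠ '\n') with
         | [] => []
         | _ :: rest => pvSplitNl rest)) := by
  intro fuel
  induction fuel with
  | zero =>
    intro l cur acc hl
    have : l = [] := List.length_eq_zero_iff.mp (Nat.le_zero.mp hl)
    subst this
    simp [PySem.Chars.splitOn.go]
  | succ n ih =>
    intro l cur acc hl
    match l with
    | [] => simp [PySem.Chars.splitOn.go]
    | c :: rest =>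
      by_cases hc : c = '\n'
      · subst hc
        have hpre : List.isPrefixOf ['\n'] ('\n' :: rest) = true := by simp [List.isPrefixOf]
        rw [PySem.Chars.splitOn.go]
        simp only [hpre, if_true, List.length_cons, List.length_nil, List.drop_succ_cons, List.drop_zero,
          Nat.zero_add]
        rw [ih rest [] (cur.reverse :: acc) (by simpa using Nat.le_of_succ_le_succ hl)]
        rw [show List.takeWhile (fun c => decide (c ≠ '\n')) ('\n' :: rest) = [] by simp,
            show List.dropWhile (fun c => decide (c ≠ '\n')) ('\n' :: rest) = '\n' :: rest by simp]
        simp only [List.reverse_cons, List.reverse_nil, List.nil_append, List.append_nil]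
        rw [← pvSplitNl_eq rest]
        simp [pvSplitNl_eq rest]
      · have hpre : List.isPrefixOf ['\n'] (c :: rest) = false := by
          simp [List.isPrefixOf]; exact fun h => absurd h.symm hc
        rw [PySem.Chars.splitOn.go]
        simp only [hpre, Bool.false_eq_true, if_false]
        rw [ih rest (c :: cur) acc (by simpa using Nat.le_of_succ_le_succ hl)]
        simp [hc]

theorem pv_splitOn_nl (cs : List Char) :
    PySem.Chars.splitOn cs ['\n'] = pvSplitNl cs := by
  rw [PySem.Chars.splitOn, pv_splitOn_go_nl (cs.length + 1) cs [] [] (by omega), pvSplitNl_eq cs]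
  simp

theorem pv_split₀_go_append : ∀ (l cur : List Char) (acc : List (List Char)),
    PySem.Chars.split₀.go l cur acc = acc.reverse ++ PySem.Chars.split₀.go l cur [] := by
  intro l
  induction l with
  | nil =>
    intro cur acc
    rw [PySem.Chars.split₀.go, PySem.Chars.split₀.go]
    by_cases h : cur.isEmpty <;> simp [h]
  | cons c rest ih =>
    intro cur acc
    rw [PySem.Chars.split₀.go]
    conv_rhs => rw [PySem.Chars.split₀.go]
    by_cases hs : PySem.Chars.isspace c
    · simp only [hs, if_true]
      by_cases h : cur.isEmpty
      · simp only [h, if_true]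
        rw [ih [] acc, ih [] []]
      · simp only [h, Bool.false_eq_true, if_false]
        rw [ih [] (cur.reverse :: acc), ih [] [cur.reverse]]
        simp
    · simp only [hs, Bool.false_eq_true, if_false]
      rw [ih (c :: cur) acc, ih (c :: cur) []]

theorem pv_split₀_go_head : ∀ (l cur : List Char) (acc : List (List Char)), cur ≠ [] →
    ∃ tl, PySem.Chars.split₀.go l cur acc =
      acc.reverse ++ ((cur.reverse ++ l.takeWhile (fun c => !PySem.Chars.isspace c)) :: tl) := by
  intro l
  induction l with
  | nil =>
    intro cur acc hcur
    refine ⟨[], ?_⟩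
    rw [PySem.Chars.split₀.go]
    have : cur.isEmpty = false := by simpa [List.isEmpty_iff] using hcur
    simp [this]
  | cons c rest ih =>
    intro cur acc hcur
    rw [PySem.Chars.split₀.go]
    have hne : cur.isEmpty = false := by simpa [List.isEmpty_iff] using hcur
    by_cases hs : PySem.Chars.isspace c
    · refine ⟨PySem.Chars.split₀.go rest [] [], ?_⟩
      simp only [hs, if_true, hne, Bool.false_eq_true, if_false]
      rw [pv_split₀_go_append rest [] (cur.reverse :: acc)]
      simp [hs]
    · obtain ⟨tl, htl⟩ := ih (c :: cur) acc (by simp)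
      refine ⟨tl, ?_⟩
      simp only [hs, Bool.false_eq_true, if_false]
      rw [htl]
      simp [hs]

theorem pv_split₀_head (c : Char) (t : List Char) (hc : PySem.Chars.isspace c = false) :
    (PySem.Chars.split₀ (c :: t)).headD [] = (c :: t).takeWhile (fun c => !PySem.Chars.isspace c) := by
  rw [PySem.Chars.split₀, PySem.Chars.split₀.go]
  simp only [hc, Bool.false_eq_true, if_false]
  obtain ⟨tl, htl⟩ := pv_split₀_go_head t [c] [] (by simp)
  rw [htl]
  simp [hc]

theorem pvScan_eq (cs : List Char) : pvScan cs =
    (if PySem.Chars.startswith cs ['/'] then [cs.takeWhile (fun c => !PySem.Chars.isspace c)] else []) ++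
    (match cs.dropWhile (fun c => c ≠ '\n') with
     | [] => []
     | _ :: rest => pvScan rest) := by
  rw [pvScan]
  rcases hd : List.dropWhile (fun c => decide (c ≠ '\n')) cs with _ | ⟨a, rest⟩ <;> simp

theorem pv_takeWhile_nonspace (cs : List Char) :
    (cs.takeWhile (fun c => c ≠ '\n')).takeWhile (fun c => !PySem.Chars.isspace c)
      = cs.takeWhile (fun c => !PySem.Chars.isspace c) := by
  induction cs with
  | nil => rfl
  | cons c t ih =>
    by_cases hc : c = '\n'
    · subst hc
      simp [show PySem.Chars.isspace '\n' = true from rfl]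
    · by_cases hs : PySem.Chars.isspace c
      · simp [hc, hs]
      · simp [hc, hs]
        simpa using ih

theorem pv_line_step (cs : List Char) (acc : List (List Char)) :
    (if PySem.Chars.startswith (cs.takeWhile (fun c => c ≠ '\n')) ['/'] then
        acc ++ [(PySem.Chars.split₀ (cs.takeWhile (fun c => c ≠ '\n'))).headD []]
      else acc)
    = acc ++ (if PySem.Chars.startswith cs ['/'] then [cs.takeWhile (fun c => !PySem.Chars.isspace c)] else []) := by
  match cs with
  | [] => simp [PySem.Chars.startswith, List.isPrefixOf]
  | c :: t =>
    by_cases hc : c = '\n'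
    · subst hc
      simp [PySem.Chars.startswith, List.isPrefixOf]
    · rw [List.takeWhile_cons]
      simp only [hc, ne_eq, not_false_iff, decide_true, if_true]
      by_cases hsl : c = '/'
      · subst hsl
        have hstart : PySem.Chars.startswith ('/' :: List.takeWhile (fun c => decide (c ≠ '\n')) t) ['/'] = true := by
          simp [PySem.Chars.startswith, List.isPrefixOf]
        have hstart' : PySem.Chars.startswith ('/' :: t) ['/'] = true := by
          simp [PySem.Chars.startswith, List.isPrefixOf]
        rw [hstart, hstart']
        rw [pv_split₀_head '/' _ (by rfl)]
        have := pv_takeWhile_nonspace ('/' :: t)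
        rw [List.takeWhile_cons] at this
        simp only [hc, ne_eq, not_false_iff, decide_true, if_true] at this
        rw [this]
        simp
      · have hstart : PySem.Chars.startswith (c :: List.takeWhile (fun c => decide (c ≠ '\n')) t) ['/'] = false := by
          simp [PySem.Chars.startswith, List.isPrefixOf]
          exact fun h => hsl h.symm
        have hstart' : PySem.Chars.startswith (c :: t) ['/'] = false := by
          simp [PySem.Chars.startswith, List.isPrefixOf]
          exact fun h => hsl h.symm
        rw [hstart, hstart']
        simp

theorem pv_foldl_splitNl (cs : List Char) (acc : List (List Char)) :
    (pvSplitNl cs).foldl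
      (fun acc line =>
        if PySem.Chars.startswith line ['/'] then
          acc ++ [(PySem.Chars.split₀ line).headD []]
        else acc) acc = acc ++ pvScan cs := by
  rw [pvSplitNl_eq cs, pvScan_eq cs]
  rcases hd : cs.dropWhile (fun c => c ≠ '\n') with _ | ⟨a, rest⟩
  · simp only [List.foldl_cons, List.foldl_nil]
    rw [pv_line_step]
    simp
  · simp only [List.foldl_cons]
    rw [pv_line_step]
    rw [pv_foldl_splitNl rest]
    simp
termination_by cs.length
decreasing_by
  have h1 : (cs.dropWhile (fun c => c ≠ '\n')).length ≤ cs.length := List.length_dropWhile_le _ _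
  rw [hd] at h1; simp at h1; omega

-- ===== VERDICT (by name: the statement is the Claim_ definition above) =====
theorem parse_gobuster_output_py_spec : Claim_equal_parse_gobuster_output_py := by
  intro output _
  unfold Spec_parse_gobuster_output_py parse_gobuster_output_py parse_gobuster_output_py_alt
  rw [pv_splitOn_nl, pv_foldl_splitNl]
  simp
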